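-- pv_equiv track=rewrite | github.com/JuunKR/calculator | validation.py | validate_now
-- ===== SOURCE A (Python) =====
-- def validate_now(formula):
--     temp_formula = ""
--     for string in formula:
--         if string.isdigit():
--             temp_formula += string
--         else:
--             temp_formula += " "
--     num_count = len(temp_formula.strip().split(" "))
--     if num_count >= 2:
--         return False
--     else:
--         return True
-- ===== SOURCE B (Python) =====
-- def validate_now(formula):
--     runs = 0
--     prev = False
--     for ch in formula:
--         d = ch.isdigit()
--         if d and not prev:
--             runs += 1
--             if runs >= 2:
--                 return False
--         prev = d
--     return True
-- ===== Notes on version B (the rewrite author's own statement) =====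
-- stated objective: faster
-- what changed: B makes a single pass counting starts of maximal digit runs and early-exits at the second run, instead of building a space-substituted copy of the string and counting the pieces after stripping and splitting it.
import Mathlib
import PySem

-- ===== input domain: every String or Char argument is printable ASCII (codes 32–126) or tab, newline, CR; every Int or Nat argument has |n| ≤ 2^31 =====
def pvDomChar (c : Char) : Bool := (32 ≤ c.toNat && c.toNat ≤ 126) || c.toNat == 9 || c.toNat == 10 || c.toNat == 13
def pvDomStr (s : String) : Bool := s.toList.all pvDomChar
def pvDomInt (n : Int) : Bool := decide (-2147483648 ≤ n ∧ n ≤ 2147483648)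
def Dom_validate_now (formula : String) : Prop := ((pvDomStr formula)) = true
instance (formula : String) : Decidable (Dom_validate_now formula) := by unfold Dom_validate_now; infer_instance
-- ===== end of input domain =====

-- B replaces A's build-a-spaced-copy-then-strip/split pipeline by a single pass that counts
-- starts of maximal digit runs, returning False as soon as a second run begins (simpler one-pass scan).

-- ===== PORT A =====
def validate_now (formula : String) : Bool :=
  let temp : List Char :=
    formula.toList.foldl
      (fun acc c => if PySem.Chars.isdigit c then acc ++ [c] else acc ++ [' ']) []
  let numCount := (PySem.Chars.splitOn (PySem.Chars.strip temp) [' ']).length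
  if 2 ≤ numCount then false else true

-- ===== PORT B =====
def altLoop : List Char → Int → Bool → Bool
  | [], _, _ => true
  | c :: rest, runs, prev =>
    let d := PySem.Chars.isdigit c
    if d && !prev then
      if 2 ≤ runs + 1 then false else altLoop rest (runs + 1) d
    else altLoop rest runs d

def validate_now_alt (formula : String) : Bool :=
  altLoop formula.toList 0 false

-- ===== PRECONDITION & SPEC =====
def Spec_validate_now (formula : String) (out : Bool) : Prop := out = validate_now_alt formula
instance (formula : String) (out : Bool) : Decidable (Spec_validate_now formula out) := by unfold Spec_validate_now; infer_instance

-- ===== CLAIM (what is proved, stated in full; the proofs are below) =====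
def Claim_equal_validate_now : Prop := ∀ (formula : String), Dom_validate_now formula → Spec_validate_now formula (validate_now formula)

-- ===== LEMMAS AND PROOFS =====

-- A's substitution: digits stay, everything else becomes a space
def fA (c : Char) : Char := if PySem.Chars.isdigit c then c else ' '

-- pattern predicates on the ORIGINAL character list
def anyD (l : List Char) : Bool := l.any PySem.Chars.isdigit
def anyND (l : List Char) : Bool := l.any (fun c => !PySem.Chars.isdigit c)
-- "a non-digit occurs with a digit somewhere after it"
def ndd : List Char → Bool
  | [] => false
  | c :: r => if PySem.Chars.isdigit c then ndd r else anyD r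
-- "at least two maximal digit runs" (scanning from outside a run)
def t1 : List Char → Bool
  | [] => false
  | c :: r => if PySem.Chars.isdigit c then ndd r else t1 r
-- same, scanning from inside a run
def t2 : List Char → Bool
  | [] => false
  | c :: r => if PySem.Chars.isdigit c then t2 r else t1 r

theorem digit_not_space (c : Char) (h : PySem.Chars.isdigit c = true) :
    PySem.Chars.isspace c = false := by
  simp only [PySem.Chars.isdigit, Bool.and_eq_true, decide_eq_true_eq, Char.le_def,
    UInt32.le_iff_toNat_le] at h
  simp only [PySem.Chars.isspace, Bool.or_eq_false_iff, Bool.and_eq_false_iff,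
    decide_eq_false_iff_not, Char.toNat]
  have h0 : '0'.val.toNat = 48 := by decide
  have h9 : '9'.val.toNat = 57 := by decide
  omega

theorem isspace_fA (c : Char) : PySem.Chars.isspace (fA c) = !PySem.Chars.isdigit c := by
  by_cases h : PySem.Chars.isdigit c = true
  · simp [fA, h, digit_not_space c h]
  · simp only [Bool.not_eq_true] at h
    simp [fA, h]
    decide
theorem fA_ne_space (c : Char) (h : PySem.Chars.isdigit c = true) : fA c ≠ ' ' := by
  simp only [fA, h, if_true]
  intro hc; subst hc; exact absurd h (by decide)

theorem temp_eq : ∀ (l acc : List Char),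
    l.foldl (fun acc c => if PySem.Chars.isdigit c then acc ++ [c] else acc ++ [' ']) acc
      = acc ++ l.map fA := by
  intro l
  induction l with
  | nil => simp
  | cons c r ih =>
    intro acc
    by_cases h : PySem.Chars.isdigit c = true
    · simp [List.foldl_cons, h, ih, fA]
    · simp only [Bool.not_eq_true] at h
      simp [List.foldl_cons, h, ih, fA]

theorem sp_len : ∀ fuel (l cur : List Char) acc, l.length < fuel →
    (PySem.Chars.splitOn.go [' '] fuel l cur acc).length = acc.length + 1 + l.count ' ' := by
  intro fuel
  induction fuel with
  | zero => intro l cur acc h; omega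
  | succ f ih =>
    intro l cur acc h
    cases l with
    | nil => simp [PySem.Chars.splitOn.go]
    | cons c rest =>
      rw [PySem.Chars.splitOn.go]
      simp only [List.isPrefixOf, List.length_cons] at *
      by_cases hc : c = ' '
      · subst hc
        simp only [BEq.rfl, Bool.true_and, if_pos, List.length_nil, Nat.zero_add,
          List.drop_succ_cons, List.drop_zero]
        rw [ih _ _ _ (by omega)]
        rw [List.count_cons_self]
        simp only [List.length_cons]
        omega
      · have hbc : (' ' == c) = false := beq_eq_false_iff_ne.mpr (Ne.symm hc)
        simp only [hbc, Bool.false_and, Bool.false_eq_true, if_false]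
        rw [ih _ _ _ (by omega)]
        rw [List.count_cons_of_ne (by simpa using hc)]

theorem mem_space_map : ∀ l : List Char, (' ' ∈ l.map fA) ↔ anyND l = true := by
  intro l
  induction l with
  | nil => simp [anyND]
  | cons c r ih =>
    by_cases h : PySem.Chars.isdigit c = true
    · have : fA c ≠ ' ' := fA_ne_space c h
      simp [anyND, h, ih, this.symm, List.any_cons]
    · simp only [Bool.not_eq_true] at h
      simp [anyND, fA, h, List.any_cons]

theorem nd_imp : ∀ l : List Char, ndd l = true → anyND l = true := by
  intro l
  induction l with
  | nil => simp [ndd]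
  | cons c r ih =>
    by_cases h : PySem.Chars.isdigit c = true
    · simp only [ndd, h, if_true]
      intro hr
      have hih := ih hr
      simp only [anyND, List.any_cons] at hih ⊢
      simp [hih]
    · simp only [Bool.not_eq_true] at h
      simp [ndd, anyND, h, List.any_cons]

theorem anyD_append (r : List Char) (c : Char) :
    anyD (r ++ [c]) = (anyD r || PySem.Chars.isdigit c) := by
  simp [anyD, List.any_append]

theorem ndd_append : ∀ (xs : List Char) (c : Char),
    ndd (xs ++ [c]) = if PySem.Chars.isdigit c then ndd xs || anyND xs else ndd xs := by
  intro xs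
  induction xs with
  | nil =>
    intro c
    by_cases h : PySem.Chars.isdigit c = true
    · simp [ndd, anyND, h]
    · simp only [Bool.not_eq_true] at h
      simp [ndd, anyD, h]
  | cons d r ih =>
    intro c
    by_cases hd : PySem.Chars.isdigit d = true
    · simp only [List.cons_append, ndd, if_true, ih c, anyND, List.any_cons, hd,
        Bool.not_true, Bool.false_or]
    · simp only [Bool.not_eq_true] at hd
      by_cases hc : PySem.Chars.isdigit c = true
      · simp [ndd, hd, hc, anyD_append, anyND, List.any_cons]
      · simp only [Bool.not_eq_true] at hc
        simp [ndd, hd, hc, anyD_append]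

theorem mem_rstrip : ∀ l : List Char,
    (' ' ∈ PySem.Chars.rstrip (l.map fA)) ↔ ndd l = true := by
  intro l
  induction l using List.reverseRecOn with
  | nil => simp [PySem.Chars.rstrip, ndd]
  | append_singleton xs c ih =>
    rw [List.map_append, List.map_singleton]
    by_cases h : PySem.Chars.isdigit c = true
    · have hsp : PySem.Chars.isspace (fA c) = false := by
        rw [isspace_fA, h]; rfl
      have : PySem.Chars.rstrip (xs.map fA ++ [fA c]) = xs.map fA ++ [fA c] := by
        simp [PySem.Chars.rstrip, List.reverse_append, hsp]
      rw [this, ndd_append, if_pos h]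
      have hne : fA c ≠ ' ' := fA_ne_space c h
      constructor
      · intro hm
        rcases List.mem_append.mp hm with hm | hm
        · simp [Bool.or_eq_true]
          exact Or.inr (by simpa [mem_space_map] using hm)
        · simp at hm; exact absurd hm.symm hne
      · intro hor
        rcases Bool.or_eq_true_iff.mp hor with hnd | hand
        · exact List.mem_append.mpr (Or.inl ((mem_space_map xs).mpr (nd_imp xs hnd)))
        · exact List.mem_append.mpr (Or.inl ((mem_space_map xs).mpr hand))
    · simp only [Bool.not_eq_true] at h
      have hsp : PySem.Chars.isspace (fA c) = true := by rw [isspace_fA, h]; rfl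
      have : PySem.Chars.rstrip (xs.map fA ++ [fA c]) = PySem.Chars.rstrip (xs.map fA) := by
        simp [PySem.Chars.rstrip, List.reverse_append, hsp]
      rw [this, ndd_append, if_neg (by simp [h]), ih]

theorem lstrip_map : ∀ l : List Char,
    PySem.Chars.lstrip (l.map fA)
      = (l.dropWhile (fun c => !PySem.Chars.isdigit c)).map fA := by
  intro l
  induction l with
  | nil => simp [PySem.Chars.lstrip]
  | cons c r ih =>
    by_cases h : PySem.Chars.isdigit c = true
    · have hsp : PySem.Chars.isspace (fA c) = false := by rw [isspace_fA, h]; rfl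
      simp [PySem.Chars.lstrip, hsp, h]
    · simp only [Bool.not_eq_true] at h
      have hsp : PySem.Chars.isspace (fA c) = true := by rw [isspace_fA, h]; rfl
      simpa [PySem.Chars.lstrip, hsp, h] using ih

theorem t1_eq : ∀ l : List Char,
    ndd (l.dropWhile (fun c => !PySem.Chars.isdigit c)) = t1 l := by
  intro l
  induction l with
  | nil => simp [ndd, t1]
  | cons c r ih =>
    by_cases h : PySem.Chars.isdigit c = true
    · simp [h, ndd, t1]
    · simp only [Bool.not_eq_true] at h
      simpa [h, t1] using ih

theorem altLoop_eq : ∀ l : List Char,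
    (∀ prev, altLoop l 0 prev = !(if prev then t2 l else t1 l)) ∧
    (∀ prev, altLoop l 1 prev = !(if prev then ndd l else anyD l)) := by
  intro l
  induction l with
  | nil => constructor <;> intro prev <;> cases prev <;> simp [altLoop, t1, t2, ndd, anyD]
  | cons c r ih =>
    obtain ⟨ih0, ih1⟩ := ih
    by_cases h : PySem.Chars.isdigit c = true
    · constructor
      · intro prev
        cases prev
        · simp only [altLoop, h, Bool.not_false, Bool.and_true, if_true,
            show ¬(2 ≤ (0 : Int) + 1) by omega, t1]
          simpa using ih1 true
        · simp only [altLoop, h, Bool.not_true, Bool.and_false, Bool.false_eq_true, if_false, t2, if_true]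
          simpa using ih0 true
      · intro prev
        cases prev
        · simp [altLoop, h, anyD, List.any_cons]
        · simp only [altLoop, h, Bool.not_true, Bool.and_false, Bool.false_eq_true, if_false, ndd, if_true]
          simpa using ih1 true
    · simp only [Bool.not_eq_true] at h
      constructor
      · intro prev
        cases prev <;>
          simp only [altLoop, h, Bool.false_and, Bool.false_eq_true, if_false, t1, t2,
            Bool.false_eq_true] <;> simpa using ih0 false
      · intro prev
        cases prev <;>
          simp only [altLoop, h, Bool.false_and, Bool.false_eq_true, if_false, ndd, anyD,
            List.any_cons, Bool.false_or] <;> simpa [anyD] using ih1 false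

-- ===== VERDICT (by name: the statement is the Claim_ definition above) =====
theorem validate_now_spec : Claim_equal_validate_now := by
  unfold Claim_equal_validate_now
  intro s _
  unfold Spec_validate_now validate_now validate_now_alt
  simp only [temp_eq, List.nil_append]
  rw [PySem.Chars.splitOn]
  rw [sp_len _ _ _ _ (by omega)]
  rw [(altLoop_eq s.toList).1 false]
  simp only [List.length_nil, Nat.zero_add]
  rw [PySem.Chars.strip, lstrip_map]
  by_cases hm : ' ' ∈ PySem.Chars.rstrip ((s.toList.dropWhile (fun c => !PySem.Chars.isdigit c)).map fA)
  · have hp : 0 < List.count ' ' (PySem.Chars.rstrip ((s.toList.dropWhile (fun c => !PySem.Chars.isdigit c)).map fA)) :=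
      List.count_pos_iff.mpr hm
    have ht : t1 s.toList = true := by
      rw [← t1_eq]
      exact (mem_rstrip _).mp hm
    rw [if_pos (by omega), ht]
    rfl
  · have hp : List.count ' ' (PySem.Chars.rstrip ((s.toList.dropWhile (fun c => !PySem.Chars.isdigit c)).map fA)) = 0 := by
      by_contra hne
      exact hm (List.count_pos_iff.mp (Nat.pos_of_ne_zero hne))
    have ht : t1 s.toList = false := by
      rw [← t1_eq]
      by_contra hne
      simp only [Bool.not_eq_false] at hne
      exact hm ((mem_rstrip _).mpr hne)
    rw [hp, if_neg (by omega), ht]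
    rfl
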